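-- pv_equiv track=rewrite | github.com/PriyankaDwivedi23/CSCI.799.09-Independent_Study | Clique.py | findSmallClique
-- ===== SOURCE A (Python) =====
-- def turan(n,r):
--     quotient,modulo=divmod(n,r)
--     if modulo:
--         return modulo * (modulo-1)//2+(2 * modulo + r * quotient)*(r-1)* quotient //2
--     return n * quotient*(r-1)//2
--
-- def findSmallClique(n,m):
--     low = 1
--     high = 3*n*n//(n*n-2*m)
--     while low < high :
--         mid =(low+high)//2
--         if turan(n,mid)>=m:
--             high = mid
--         else:
--             low = mid+1
--     return high
-- ===== SOURCE B (Python) =====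
-- def turan(n, r):
--     quotient, modulo = divmod(n, r)
--     if modulo:
--         return modulo * (modulo - 1) // 2 + (2 * modulo + r * quotient) * (r - 1) * quotient // 2
--     return n * quotient * (r - 1) // 2
--
--
-- def findSmallClique(n, m):
--     high = 3 * n * n // (n * n - 2 * m)
--     width = high - 1          # candidate answers are 1 .. high-1; high is the fallback
--     if width < 1:
--         return high
--     step = 1
--     while step * 2 <= width:
--         step *= 2
--     last_fail = 0             # largest r found so far with turan(n, r) < m
--     while step >= 1:
--         nxt = last_fail + step
--         if nxt <= width and turan(n, nxt) < m:
--             last_fail = nxt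
--         step //= 2
--     return last_fail + 1
-- ===== Notes on version B (the rewrite author's own statement) =====
-- stated objective: alternative
-- what changed: A's interval-halving binary search (low/high with midpoints) is replaced by binary lifting: grow a power-of-two step to the search width, then descend through halved steps accumulating the largest index where turan(n, r) still falls short of m; equality rests on turan being monotone non-decreasing in r, which is proved. Pre_ excludes only n*n - 2*m = 0, where A raises ZeroDivisionError.
import Mathlib
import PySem

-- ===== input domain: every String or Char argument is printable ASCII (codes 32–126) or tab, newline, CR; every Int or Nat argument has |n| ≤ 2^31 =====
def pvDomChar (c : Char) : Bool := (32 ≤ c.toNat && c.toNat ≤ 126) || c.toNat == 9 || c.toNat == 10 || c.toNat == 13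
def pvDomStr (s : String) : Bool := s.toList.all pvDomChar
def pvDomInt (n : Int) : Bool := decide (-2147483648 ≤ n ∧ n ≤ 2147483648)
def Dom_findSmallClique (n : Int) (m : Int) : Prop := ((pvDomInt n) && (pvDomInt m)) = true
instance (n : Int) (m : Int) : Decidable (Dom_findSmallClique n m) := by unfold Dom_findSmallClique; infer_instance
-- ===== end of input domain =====

-- B replaces A's interval-halving binary search by binary lifting (descending power-of-two
-- steps from the largest failing index); same O(log high) cost, different decomposition.

-- ===== PORT A =====
-- helper turan(n, r), shared verbatim by both Pythons
def turanP (n r : Int) : Int :=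
  let quotient := PySem.Int.floordiv n r
  let modulo := PySem.Int.mod n r
  if modulo ≠ 0 then
    PySem.Int.floordiv (modulo * (modulo - 1)) 2 +
      PySem.Int.floordiv ((2 * modulo + r * quotient) * (r - 1) * quotient) 2
  else
    PySem.Int.floordiv (n * quotient * (r - 1)) 2

-- the while-loop of A; the Nat fuel only makes the recursion structural and never
-- runs out when started at (high - low).toNat, since high - low shrinks each iteration
def bsearchA (n m : Int) : Nat → Int → Int → Int
  | 0, _, high => high
  | fuel + 1, low, high =>
      if low < high then
        let mid := PySem.Int.floordiv (low + high) 2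
        if turanP n mid ≥ m then bsearchA n m fuel low mid
        else bsearchA n m fuel (mid + 1) high
      else high

def findSmallClique (n : Int) (m : Int) : Int :=
  let high := PySem.Int.floordiv (3 * n * n) (n * n - 2 * m)
  bsearchA n m (high - 1).toNat 1 high

-- ===== PORT B =====
-- 'while step * 2 <= width: step *= 2'; the Nat fuel only makes the recursion
-- structural and never runs out when started at width.toNat
def growB (width : Int) : Nat → Int → Int
  | 0, s => s
  | fuel + 1, s => if s * 2 ≤ width then growB width fuel (s * 2) else s

-- 'while step >= 1: nxt = last + step; …; step //= 2'; fuel as above, ample at step.toNat + 2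
def liftB (n m width : Int) : Nat → Int → Int → Int
  | 0, _, last => last
  | fuel + 1, step, last =>
      if step ≥ 1 then
        liftB n m width fuel (PySem.Int.floordiv step 2)
          (if last + step ≤ width ∧ turanP n (last + step) < m then last + step else last)
      else last

def findSmallClique_alt (n : Int) (m : Int) : Int :=
  let high := PySem.Int.floordiv (3 * n * n) (n * n - 2 * m)
  let width := high - 1
  if width < 1 then high
  else
    let step := growB width width.toNat 1
    liftB n m width (step.toNat + 2) step 0 + 1

-- ===== PRECONDITION & SPEC =====
-- A raises ZeroDivisionError exactly when n*n - 2*m = 0 (so does B); those inputs are excluded.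
def Pre_findSmallClique (n : Int) (m : Int) : Prop := n * n - 2 * m ≠ 0
instance (n : Int) (m : Int) : Decidable (Pre_findSmallClique n m) := by
  unfold Pre_findSmallClique; infer_instance

def pvWitness_findSmallClique : Int × Int := (5, 7)

def Spec_findSmallClique (n : Int) (m : Int) (out : Int) : Prop := out = findSmallClique_alt n m
instance (n : Int) (m : Int) (out : Int) : Decidable (Spec_findSmallClique n m out) := by
  unfold Spec_findSmallClique; infer_instance

-- ===== CLAIM (what is proved, stated in full; the proofs are below) =====
def Claim_equal_findSmallClique : Prop := ∀ (n : Int) (m : Int), Dom_findSmallClique n m → Pre_findSmallClique n m → Spec_findSmallClique n m (findSmallClique n m)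

-- ===== LEMMAS AND PROOFS =====

-- proof-side total linear scan over [low, high): first qualifying r, else high
def scanT (n m : Int) : Nat → Int → Int → Int
  | 0, _, high => high
  | fuel + 1, r, high =>
      if r < high then
        if turanP n r ≥ m then r else scanT n m fuel (r + 1) high
      else high

-- a // 2 when the dividend is exhibited as 2*k
theorem fd2 (a k : Int) (h : a = 2 * k) : PySem.Int.floordiv a 2 = k := by
  rw [h, PySem.Int.floordiv_eq_ediv_of_pos (by norm_num)]
  exact Int.mul_ediv_cancel_left k (by norm_num)

-- uniqueness of Python floor-division/mod against an exhibited decomposition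
theorem fd_unique (n r q s : Int) (hr : 0 < r) (h : q * r + s = n) (h0 : 0 ≤ s) (h1 : s < r) :
    PySem.Int.floordiv n r = q ∧ PySem.Int.mod n r = s := by
  have hq : PySem.Int.floordiv n r = q := by
    rw [PySem.Int.floordiv_eq_iff_of_pos hr]
    constructor <;> nlinarith
  refine ⟨hq, ?_⟩
  have hm := PySem.Int.floordiv_mul_add_mod n r
  rw [hq] at hm
  linarith

-- closed form: for r ≥ 1, 2 * turan n r = n(n-1) - q(n + s - r) with q = n // r, s = n % r
theorem two_turanP (n r : Int) (hr : 1 ≤ r) :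
    2 * turanP n r = n * (n - 1) -
      PySem.Int.floordiv n r * (n + PySem.Int.mod n r - r) := by
  have hr0 : (0:Int) < r := by omega
  have hqs := PySem.Int.floordiv_mul_add_mod n r
  have hs0 := PySem.Int.mod_nonneg n hr0
  have hs1 := PySem.Int.mod_lt n hr0
  set q := PySem.Int.floordiv n r with hq
  set s := PySem.Int.mod n r with hs
  have hev : ∃ t, (r - 1) * r = 2 * t := (Int.even_mul_succ_self (r - 1)).elim (fun t ht => ⟨t, by linarith⟩)
  obtain ⟨t, ht⟩ := hev
  unfold turanP
  rw [← hq, ← hs]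
  by_cases h0 : s = 0
  · have hn : n = q * r := by rw [h0] at hqs; linarith
    rw [if_neg (by simpa using h0)]
    have he : n * q * (r - 1) = 2 * (q * q * t) := by rw [hn]; linear_combination (q * q) * ht
    rw [fd2 _ _ he, h0, hn]
    linear_combination (-(q * q)) * ht
  · rw [if_pos (by simpa using h0)]
    obtain ⟨u, hu⟩ : ∃ u, (s - 1) * s = 2 * u := (Int.even_mul_succ_self (s - 1)).elim (fun u h => ⟨u, by linarith⟩)
    have e1 : s * (s - 1) = 2 * u := by linarith [hu]
    have e2 : (2 * s + r * q) * (r - 1) * q = 2 * (s * (r - 1) * q + q * q * t) := by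
      linear_combination (q * q) * ht
    have hn : n = q * r + s := by linarith
    rw [fd2 _ _ e1, fd2 _ _ e2, hn]
    linear_combination (-1 : Int) * hu + (-(q * q)) * ht

-- vertex-addition recurrence, valid for every integer n
theorem two_turanP_succ_n (n r : Int) (hr : 1 ≤ r) :
    2 * turanP n r = 2 * turanP (n - 1) r + 2 * (n - 1) -
      2 * PySem.Int.floordiv (n - 1) r := by
  have hr0 : (0:Int) < r := by omega
  have hqs := PySem.Int.floordiv_mul_add_mod n r
  have hs0 := PySem.Int.mod_nonneg n hr0
  have hs1 := PySem.Int.mod_lt n hr0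
  set q := PySem.Int.floordiv n r with hq
  set s := PySem.Int.mod n r with hs
  rw [two_turanP n r hr, two_turanP (n - 1) r hr, ← hq, ← hs]
  by_cases h0 : s = 0
  · have hn : n = q * r := by rw [h0] at hqs; linarith
    obtain ⟨hq', hs'⟩ := fd_unique (n - 1) r (q - 1) (r - 1) hr0 (by rw [hn]; ring) (by omega) (by omega)
    rw [hq', hs', h0, hn]
    ring
  · obtain ⟨hq', hs'⟩ := fd_unique (n - 1) r q (s - 1) hr0 (by omega) (by omega) (by omega)
    rw [hq', hs']
    ring

-- floor(k/(r+1)) ≤ floor(k/r) for k ≥ 0, reversed for k < 0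
theorem floordiv_succ_le (k r : Int) (hr : 1 ≤ r) (hk : 0 ≤ k) :
    PySem.Int.floordiv k (r + 1) ≤ PySem.Int.floordiv k r := by
  have hr0 : (0:Int) < r := by omega
  have hr1 : (0:Int) < r + 1 := by omega
  have ha := PySem.Int.floordiv_mul_add_mod k r
  have ha0 := PySem.Int.mod_nonneg k hr0
  have ha1 := PySem.Int.mod_lt k hr0
  have hb := PySem.Int.floordiv_mul_add_mod k (r + 1)
  have hb0 := PySem.Int.mod_nonneg k hr1
  have hb1 := PySem.Int.mod_lt k hr1
  set a := PySem.Int.floordiv k r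
  set b := PySem.Int.floordiv k (r + 1)
  have hannn : 0 ≤ a := by nlinarith
  by_contra hcon
  rw [not_le] at hcon
  nlinarith

theorem floordiv_le_succ (k r : Int) (hr : 1 ≤ r) (hk : k < 0) :
    PySem.Int.floordiv k r ≤ PySem.Int.floordiv k (r + 1) := by
  have hr0 : (0:Int) < r := by omega
  have hr1 : (0:Int) < r + 1 := by omega
  have ha := PySem.Int.floordiv_mul_add_mod k r
  have ha0 := PySem.Int.mod_nonneg k hr0
  have ha1 := PySem.Int.mod_lt k hr0
  have hb := PySem.Int.floordiv_mul_add_mod k (r + 1)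
  have hb0 := PySem.Int.mod_nonneg k hr1
  have hb1 := PySem.Int.mod_lt k hr1
  set a := PySem.Int.floordiv k r
  set b := PySem.Int.floordiv k (r + 1)
  have hbn : b < 0 := by nlinarith
  by_contra hcon
  rw [not_le] at hcon
  nlinarith

theorem turanP_zero (r : Int) (hr : 1 ≤ r) : turanP 0 r = 0 := by
  have h := two_turanP 0 r hr
  obtain ⟨hq, hs⟩ := fd_unique 0 r 0 0 (by omega) (by ring) le_rfl (by omega)
  rw [hq, hs] at h
  norm_num at h
  linarith

-- turan n is monotone in r: 2*turan n r ≤ 2*turan n (r+1), by induction on n from 0 in both directions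
theorem E_pos (r : Int) (hr : 1 ≤ r) : ∀ k : Nat, 2 * turanP (k : Int) r ≤ 2 * turanP (k : Int) (r + 1) := by
  intro k
  induction k with
  | zero => simp [turanP_zero r hr, turanP_zero (r + 1) (by omega)]
  | succ k ih =>
      have h1 := two_turanP_succ_n ((k : Int) + 1) r hr
      have h2 := two_turanP_succ_n ((k : Int) + 1) (r + 1) (by omega)
      have h3 := floordiv_succ_le (k : Int) r hr (by positivity)
      push_cast
      have e : ((k : Int) + 1) - 1 = (k : Int) := by ring
      rw [e] at h1 h2
      linarith

theorem E_neg (r : Int) (hr : 1 ≤ r) : ∀ k : Nat, 2 * turanP (-(k : Int)) r ≤ 2 * turanP (-(k : Int)) (r + 1) := by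
  intro k
  induction k with
  | zero => simp [turanP_zero r hr, turanP_zero (r + 1) (by omega)]
  | succ k ih =>
      have h1 := two_turanP_succ_n (-(k : Int)) r hr
      have h2 := two_turanP_succ_n (-(k : Int)) (r + 1) (by omega)
      push_cast
      have e : -((k : Int) + 1) = -(k : Int) - 1 := by ring
      rw [e]
      have h3 := floordiv_le_succ (-(k : Int) - 1) r hr (by omega)
      linarith

-- turan is monotone non-decreasing in r (step form)
theorem turanP_step (n r : Int) (hr : 1 ≤ r) : turanP n r ≤ turanP n (r + 1) := by
  by_cases hn : 0 ≤ n
  · have h := E_pos r hr n.toNat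
    rw [Int.toNat_of_nonneg hn] at h
    linarith
  · have h := E_neg r hr (-n).toNat
    have hx : -((-n).toNat : Int) = n := by omega
    rw [hx] at h
    linarith

theorem turanP_mono (n a b : Int) (ha : 1 ≤ a) (hab : a ≤ b) : turanP n a ≤ turanP n b := by
  induction b, hab using Int.le_induction with
  | base => exact le_rfl
  | succ b hb ih => exact le_trans ih (turanP_step n b (by omega))

-- fuel does not matter as long as it covers the interval
theorem scanT_fuel (n m high : Int) :
    ∀ (f1 : Nat), ∀ (f2 : Nat) (low : Int), (high - low).toNat ≤ f1 → (high - low).toNat ≤ f2 →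
      scanT n m f1 low high = scanT n m f2 low high := by
  intro f1
  induction f1 with
  | zero =>
      intro f2 low h1 h2
      have hnl : ¬ low < high := by omega
      cases f2 with
      | zero => rfl
      | succ f2 => rw [scanT, scanT, if_neg hnl]
  | succ f1 ih =>
      intro f2 low h1 h2
      by_cases hl : low < high
      · cases f2 with
        | zero => omega
        | succ f2 =>
            rw [scanT, scanT, if_pos hl, if_pos hl]
            by_cases hp : turanP n low ≥ m
            · rw [if_pos hp, if_pos hp]
            · rw [if_neg hp, if_neg hp]
              exact ih f2 (low + 1) (by omega) (by omega)
      · cases f2 with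
        | zero => rw [scanT, scanT, if_neg hl]
        | succ f2 => rw [scanT, scanT, if_neg hl, if_neg hl]

-- a qualifying point truncates the scan
theorem scanT_trunc (n m mid high : Int) (hmid : turanP n mid ≥ m) (hmh : mid ≤ high) :
    ∀ (fuel : Nat) (low : Int), low ≤ mid → (high - low).toNat ≤ fuel →
      scanT n m fuel low high = scanT n m fuel low mid := by
  intro fuel
  induction fuel with
  | zero =>
      intro low hlm hf
      have : mid = high := by omega
      rw [this]
  | succ fuel ih =>
      intro low hlm hf
      by_cases hcase : low = mid
      · subst hcase
        by_cases h1 : low < high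
        · rw [scanT, scanT, if_pos h1, if_pos hmid, if_neg (lt_irrefl low)]
        · have : low = high := by omega
          rw [this]
      · have hlow : low < mid := by omega
        have h1 : low < high := by omega
        rw [scanT, scanT, if_pos h1, if_pos hlow]
        by_cases hp : turanP n low ≥ m
        · rw [if_pos hp, if_pos hp]
        · rw [if_neg hp, if_neg hp]
          exact ih (low + 1) (by omega) (by omega)

-- scanning past a prefix on which the predicate fails
theorem scanT_skip (n m lo mid high : Int) (hmh : mid < high)
    (hfail : ∀ x, lo ≤ x → x ≤ mid → ¬ turanP n x ≥ m) :
    ∀ (fuel : Nat) (low : Int), lo ≤ low → low ≤ mid + 1 → (high - low).toNat ≤ fuel →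
      scanT n m fuel low high = scanT n m fuel (mid + 1) high := by
  intro fuel
  induction fuel with
  | zero =>
      intro low hlo hlm hf
      have : low = mid + 1 := by omega
      rw [this]
  | succ fuel ih =>
      intro low hlo hlm hf
      by_cases hcase : low = mid + 1
      · rw [hcase]
      · have hlow : low ≤ mid := by omega
        have h1 : low < high := by omega
        rw [scanT, if_pos h1, if_neg (hfail low hlo hlow)]
        calc scanT n m fuel (low + 1) high
            = scanT n m fuel (mid + 1) high := ih (low + 1) (by omega) (by omega) (by omega)
          _ = scanT n m (fuel + 1) (mid + 1) high :=
              scanT_fuel n m high fuel (fuel + 1) (mid + 1) (by omega) (by omega)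

-- the binary search equals the linear scan on [low, high)
theorem bsearchA_eq_scanT (n m : Int) :
    ∀ (fuel : Nat) (low high : Int), 1 ≤ low → (high - low).toNat ≤ fuel →
      bsearchA n m fuel low high = scanT n m fuel low high := by
  intro fuel
  induction fuel with
  | zero => intro low high _ _; rfl
  | succ fuel ih =>
      intro low high hlow hf
      by_cases h : low < high
      · have hmid := PySem.Int.floordiv_two_mid_bounds (le_of_lt h)
        have hmlt : PySem.Int.floordiv (low + high) 2 < high :=
          (PySem.Int.floordiv_lt_iff_lt_mul (a := low + high) (b := 2) (q := high)
            (by omega)).mpr (by omega)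
        rw [bsearchA, if_pos h]
        show (if turanP n (PySem.Int.floordiv (low + high) 2) ≥ m then
            bsearchA n m fuel low (PySem.Int.floordiv (low + high) 2)
          else bsearchA n m fuel (PySem.Int.floordiv (low + high) 2 + 1) high) =
            scanT n m (fuel + 1) low high
        set mid := PySem.Int.floordiv (low + high) 2 with hmdef
        by_cases hp : turanP n mid ≥ m
        · rw [if_pos hp]
          calc bsearchA n m fuel low mid
              = scanT n m fuel low mid := ih low mid hlow (by omega)
            _ = scanT n m (fuel + 1) low mid :=
                scanT_fuel n m mid fuel (fuel + 1) low (by omega) (by omega)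
            _ = scanT n m (fuel + 1) low high :=
                (scanT_trunc n m mid high hp (le_of_lt hmlt) (fuel + 1) low hmid.1 (by omega)).symm
        · rw [if_neg hp]
          have hfail : ∀ x, low ≤ x → x ≤ mid → ¬ turanP n x ≥ m := by
            intro x hx1 hx2 hge
            exact hp (le_trans hge (turanP_mono n x mid (by omega) hx2))
          calc bsearchA n m fuel (mid + 1) high
              = scanT n m fuel (mid + 1) high := ih (mid + 1) high (by omega) (by omega)
            _ = scanT n m (fuel + 1) (mid + 1) high :=
                scanT_fuel n m high fuel (fuel + 1) (mid + 1) (by omega) (by omega)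
            _ = scanT n m (fuel + 1) low high :=
                (scanT_skip n m low mid high hmlt hfail (fuel + 1) low le_rfl (by omega) (by omega)).symm
      · rw [bsearchA, if_neg h, scanT, if_neg h]

-- the entry point of the scan: a qualifying low is returned immediately
theorem scanT_enter (n m : Int) (fuel : Nat) (low high : Int) (hl : low < high)
    (hf : (high - low).toNat ≤ fuel) (hp : turanP n low ≥ m) :
    scanT n m fuel low high = low := by
  cases fuel with
  | zero => omega
  | succ fuel => rw [scanT, if_pos hl, if_pos hp]

-- the scan falls through to high when everything fails
theorem scanT_allfail (n m high : Int) :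
    ∀ (fuel : Nat) (low : Int), (∀ x, low ≤ x → x < high → ¬ turanP n x ≥ m) →
      scanT n m fuel low high = high := by
  intro fuel
  induction fuel with
  | zero => intro low _; rfl
  | succ fuel ih =>
      intro low hfail
      rw [scanT]
      by_cases hl : low < high
      · rw [if_pos hl, if_neg (hfail low le_rfl hl)]
        exact ih (low + 1) (fun x hx1 hx2 => hfail x (by omega) hx2)
      · rw [if_neg hl]

-- growB returns a power of two s with s ≤ width < 2*s
theorem growB_spec (width : Int) :
    ∀ (fuel : Nat) (s : Int) (j : Nat), s = 2 ^ j → s ≤ width → (width - s).toNat ≤ fuel →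
      ∃ k : Nat, growB width fuel s = 2 ^ k ∧ growB width fuel s ≤ width ∧
        width < 2 * growB width fuel s := by
  intro fuel
  induction fuel with
  | zero =>
      intro s j hj hsw hf
      have hp2 : (0:Int) < 2 ^ j := pow_pos (by norm_num) j
      have hs1 : (1:Int) ≤ s := by omega
      have : width = s := by omega
      exact ⟨j, by simpa [growB] using hj, by simp [growB]; omega, by simp [growB]; omega⟩
  | succ fuel ih =>
      intro s j hj hsw hf
      have hp2 : (0:Int) < 2 ^ j := pow_pos (by norm_num) j
      have hs1 : (1:Int) ≤ s := by omega
      rw [growB]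
      by_cases h : s * 2 ≤ width
      · exact ih (s * 2) (j + 1) (by rw [hj]; ring) h (by omega) |>.imp
          (fun k hk => by simpa [if_pos h] using hk)
      · exact ⟨j, by simpa [if_neg h] using hj, by rw [if_neg h]; omega, by rw [if_neg h]; omega⟩

-- halving a power of two under Python floor division
theorem fd_pow_succ (k : Nat) : PySem.Int.floordiv ((2:Int) ^ (k + 1)) 2 = 2 ^ k :=
  fd2 _ _ (by ring)

theorem fd_one_two : PySem.Int.floordiv 1 2 = 0 :=
  (fd_unique 1 2 0 1 (by norm_num) (by ring) (by norm_num) (by norm_num)).1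

-- binary lifting invariant: from a power-of-two step and a bracketed boundary,
-- liftB lands on the largest failing index (or 0)
theorem liftB_spec (n m width : Int) :
    ∀ (k : Nat) (fuel : Nat) (last : Int), k + 2 ≤ fuel →
      0 ≤ last → last ≤ width →
      (last = 0 ∨ turanP n last < m) →
      (width < last + 2 * 2 ^ k ∨ m ≤ turanP n (last + 2 * 2 ^ k)) →
      (0 ≤ liftB n m width fuel (2 ^ k) last ∧ liftB n m width fuel (2 ^ k) last ≤ width ∧
        (liftB n m width fuel (2 ^ k) last = 0 ∨ turanP n (liftB n m width fuel (2 ^ k) last) < m) ∧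
        (width ≤ liftB n m width fuel (2 ^ k) last ∨
          m ≤ turanP n (liftB n m width fuel (2 ^ k) last + 1))) := by
  intro k
  induction k with
  | zero =>
      intro fuel last hfuel h0 hw hfail hbr
      obtain ⟨f1, rfl⟩ : ∃ f1, fuel = f1 + 1 := ⟨fuel - 1, by omega⟩
      obtain ⟨f2, rfl⟩ : ∃ f2, f1 = f2 + 1 := ⟨f1 - 1, by omega⟩
      rw [liftB, if_pos (by norm_num), pow_zero, fd_one_two]
      by_cases h : last + 1 ≤ width ∧ turanP n (last + 1) < m
      · rw [if_pos h, liftB, if_neg (by norm_num)]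
        refine ⟨by omega, h.1, Or.inr h.2, ?_⟩
        rcases hbr with hbr | hbr
        · exact Or.inl (by omega)
        · refine Or.inr ?_
          have e : last + 2 * 2 ^ 0 = last + 1 + 1 := by ring
          rwa [e] at hbr
      · rw [if_neg h, liftB, if_neg (by norm_num)]
        refine ⟨h0, hw, hfail, ?_⟩
        rcases not_and_or.mp h with h | h
        · exact Or.inl (by omega)
        · exact Or.inr (by omega)
  | succ k ih =>
      intro fuel last hfuel h0 hw hfail hbr
      obtain ⟨f1, rfl⟩ : ∃ f1, fuel = f1 + 1 := ⟨fuel - 1, by omega⟩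
      have hp2 : (0:Int) < 2 ^ (k + 1) := pow_pos (by norm_num) (k + 1)
      have hstep1 : (1:Int) ≤ 2 ^ (k + 1) := by omega
      rw [liftB, if_pos (by omega), fd_pow_succ]
      by_cases h : last + 2 ^ (k + 1) ≤ width ∧ turanP n (last + 2 ^ (k + 1)) < m
      · rw [if_pos h]
        refine ih f1 (last + 2 ^ (k + 1)) (by omega) (by omega) h.1 (Or.inr h.2) ?_
        have e : last + 2 ^ (k + 1) + 2 * 2 ^ k = last + 2 * 2 ^ (k + 1) := by ring
        rw [e]
        exact hbr
      · rw [if_neg h]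
        refine ih f1 last (by omega) h0 hw hfail ?_
        have e : last + 2 * 2 ^ k = last + 2 ^ (k + 1) := by ring
        rw [e]
        rcases not_and_or.mp h with h | h
        · exact Or.inl (by omega)
        · exact Or.inr (by omega)

-- B's result equals the total scan over [1, high), for high ≥ 2
theorem alt_eq_scanT (n m high : Int) (hh : 2 ≤ high) :
    liftB n m (high - 1) ((growB (high - 1) (high - 1).toNat 1).toNat + 2)
        (growB (high - 1) (high - 1).toNat 1) 0 + 1 =
      scanT n m (high - 1).toNat 1 high := by
  have hw1 : (1:Int) ≤ high - 1 := by omega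
  obtain ⟨k, hk, hkw, hkb⟩ := growB_spec (high - 1) (high - 1).toNat 1 0 (by norm_num) hw1 (by omega)
  rw [hk] at hkw hkb ⊢
  have htn : ((2:Int) ^ k).toNat = 2 ^ k := by
    have : ((2:Int) ^ k) = ((2 ^ k : Nat) : Int) := by push_cast; ring
    rw [this, Int.toNat_natCast]
  rw [htn]
  have hp2 : (0:Int) < 2 ^ k := pow_pos (by norm_num) k
  have hfuel : k + 2 ≤ 2 ^ k + 2 := by
    have := Nat.lt_two_pow_self (n := k)
    omega
  have hspec := liftB_spec n m (high - 1) k (2 ^ k + 2) 0 hfuel le_rfl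
    (by omega) (Or.inl rfl) (Or.inl (by omega))
  set L := liftB n m (high - 1) (2 ^ k + 2) (2 ^ k) 0 with hLdef
  obtain ⟨hL0, hLw, hLf, hLb⟩ := hspec
  have hfailL : ∀ x, 1 ≤ x → x ≤ L → ¬ turanP n x ≥ m := by
    intro x hx1 hx2 hge
    rcases hLf with h | h
    · omega
    · exact absurd (le_trans hge (turanP_mono n x L hx1 hx2)) (not_le.mpr h)
  rcases hLb with hLb | hLb
  · -- L = high - 1: everything in [1, high) fails, scan returns high
    rw [scanT_allfail n m high (high - 1).toNat 1
      (fun x hx1 hx2 => hfailL x hx1 (by omega))]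
    omega
  · -- L < high - 1 or qualifying L+1; scan returns L+1
    by_cases hLtop : L = high - 1
    · rw [scanT_allfail n m high (high - 1).toNat 1
        (fun x hx1 hx2 => hfailL x hx1 (by omega))]
      omega
    · have hstep : L + 1 < high := by omega
      rw [scanT_skip n m 1 L high (by omega) hfailL (high - 1).toNat 1 (by omega) (by omega)
        (by omega)]
      exact (scanT_enter n m (high - 1).toNat (L + 1) high hstep (by omega) hLb).symm

-- the top-level bodies, with the let-bindings written out
theorem mainEq (n m high : Int) :
    bsearchA n m (high - 1).toNat 1 high =
      (if high - 1 < 1 then high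
       else liftB n m (high - 1) ((growB (high - 1) (high - 1).toNat 1).toNat + 2)
              (growB (high - 1) (high - 1).toNat 1) 0 + 1) := by
  by_cases hh : high - 1 < 1
  · rw [if_pos hh]
    have h0 : (high - 1).toNat = 0 := by omega
    rw [h0]
    rfl
  · rw [if_neg hh, bsearchA_eq_scanT n m _ 1 _ (by norm_num) (by omega)]
    exact (alt_eq_scanT n m high (by omega)).symm

-- ===== VERDICT (by name: the statement is the Claim_ definition above) =====
theorem findSmallClique_spec : Claim_equal_findSmallClique := by
  intro n m _ _
  show findSmallClique n m = findSmallClique_alt n m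
  exact mainEq n m (PySem.Int.floordiv (3 * n * n) (n * n - 2 * m))
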